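-- pv_equiv track=rewrite | github.com/cjwelborn/cjwelborn.github.io | config/gen_sitemap.py | get_url_priority
-- ===== SOURCE A (Python) =====
-- def get_url_priority(filepath, default='0.81'):
--     pri_map = {
--         'development.html': '0.9',
--         'downloads.html': '0.9',
--         'index.html': '1.0',
--         'source.html': '0.5',
--         'example.html': '0.5',
--         'annotated.html': '0.5',
--     }
--     pri_map.update({f'_{i}.html': '0.4' for i in range(1, 10)})
--     pri_map.update({f'_{s}.html': '0.4' for s in 'abcdefghijklmnopqrstuvwxyz'})
--
--     for ending, pri in pri_map.items():
--         if filepath.endswith(ending):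
--             return pri
--     return default
-- ===== SOURCE B (Python) =====
-- def get_url_priority(filepath, default='0.81'):
--     if filepath.endswith('development.html') or filepath.endswith('downloads.html'):
--         return '0.9'
--     if filepath.endswith('index.html'):
--         return '1.0'
--     if (filepath.endswith('source.html') or filepath.endswith('example.html')
--             or filepath.endswith('annotated.html')):
--         return '0.5'
--     if (len(filepath) >= 7 and filepath.endswith('.html') and filepath[-7] == '_'
--             and filepath[-6] in '123456789abcdefghijklmnopqrstuvwxyz'):
--         return '0.4'
--     return default
-- ===== Notes on version B (the rewrite author's own statement) =====
-- stated objective: simpler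
-- what changed: Replaces the 41-entry dict built from two comprehensions and scanned entry by entry with a short if/elif chain: six fixed endswith checks grouped by priority, and the whole generated underscore-single-character family collapsed into one direct test on the last seven characters (suffix check plus the character before it drawn from the nonzero digits and lowercase letters).
import Mathlib
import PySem

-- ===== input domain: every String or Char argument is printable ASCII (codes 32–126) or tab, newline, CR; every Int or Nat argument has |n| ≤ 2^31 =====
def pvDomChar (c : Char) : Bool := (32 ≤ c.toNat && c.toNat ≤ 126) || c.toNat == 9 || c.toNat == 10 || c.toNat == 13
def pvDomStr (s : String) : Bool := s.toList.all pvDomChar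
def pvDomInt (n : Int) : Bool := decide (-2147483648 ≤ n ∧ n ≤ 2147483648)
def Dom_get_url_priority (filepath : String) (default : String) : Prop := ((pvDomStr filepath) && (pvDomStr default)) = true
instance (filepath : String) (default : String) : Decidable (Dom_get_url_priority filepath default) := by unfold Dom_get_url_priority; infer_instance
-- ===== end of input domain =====

-- B replaces A's 41-entry dict scan by a short if/elif chain: the generated '_1..9'/'_a..z'
-- family becomes one direct test on the last seven characters (objective: simpler).

-- ===== PORT A =====
-- pri_map: the dict literal, then the two .update(...) comprehensions (update = insert each item in order)
def pvPriMap : PySem.Dict String String :=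
  let d0 : PySem.Dict String String := PySem.Dict.mk
    [("development.html", "0.9"), ("downloads.html", "0.9"), ("index.html", "1.0"),
     ("source.html", "0.5"), ("example.html", "0.5"), ("annotated.html", "0.5")]
  let d1 := (PySem.List.pyRange 1 10 1).foldl
    (fun d i => d.insert ("_" ++ PySem.Int.toStr i ++ ".html") "0.4") d0
  "abcdefghijklmnopqrstuvwxyz".toList.foldl
    (fun d s => d.insert ("_" ++ String.ofList [s] ++ ".html") "0.4") d1

-- the 'for ending, pri in pri_map.items(): if filepath.endswith(ending): return pri' loop
def pvLoopA (items : List (String × String)) (filepath default : String) : String :=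
  match items with
  | [] => default
  | (ending, pri) :: rest =>
      if PySem.Str.endswith filepath ending then pri else pvLoopA rest filepath default

def get_url_priority (filepath : String) (default : String) : String :=
  pvLoopA pvPriMap.items filepath default

-- ===== PORT B =====
-- 'filepath[-6] in "123…z"' is a one-char-in-string test = membership of that char
def get_url_priority_alt (filepath : String) (default : String) : String :=
  if PySem.Str.endswith filepath "development.html" || PySem.Str.endswith filepath "downloads.html" then "0.9"
  else if PySem.Str.endswith filepath "index.html" then "1.0"
  else if PySem.Str.endswith filepath "source.html" || PySem.Str.endswith filepath "example.html"
        || PySem.Str.endswith filepath "annotated.html" then "0.5"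
  else if (7 ≤ PySem.Str.len filepath) && PySem.Str.endswith filepath ".html"
        && (PySem.Str.pyGet? filepath (-7) == some '_')
        && (match PySem.Str.pyGet? filepath (-6) with
            | some c => "123456789abcdefghijklmnopqrstuvwxyz".toList.contains c
            | none => false) then "0.4"
  else default

-- ===== PRECONDITION & SPEC =====
def Spec_get_url_priority (filepath : String) (default : String) (out : String) : Prop := out = get_url_priority_alt filepath default
instance (filepath : String) (default : String) (out : String) : Decidable (Spec_get_url_priority filepath default out) := by unfold Spec_get_url_priority; infer_instance

-- ===== CLAIM (what is proved, stated in full; the proofs are below) =====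
def Claim_equal_get_url_priority : Prop := ∀ (filepath : String) (default : String), Dom_get_url_priority filepath default → Spec_get_url_priority filepath default (get_url_priority filepath default)

-- ===== LEMMAS AND PROOFS =====

def pvClassChars : List Char := "123456789abcdefghijklmnopqrstuvwxyz".toList

def pvTail35 : List (String × String) :=
  pvClassChars.map (fun c => ("_" ++ String.ofList [c] ++ ".html", "0.4"))

set_option maxRecDepth 20000 in
theorem pvPriMap_items : pvPriMap.items =
    [("development.html", "0.9"), ("downloads.html", "0.9"), ("index.html", "1.0"),
     ("source.html", "0.5"), ("example.html", "0.5"), ("annotated.html", "0.5")] ++ pvTail35 := by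
  decide

theorem pvLoopA_const (l : List (String × String)) (fp d : String)
    (h : ∀ e ∈ l, e.2 = "0.4") :
    pvLoopA l fp d = if l.any (fun e => PySem.Str.endswith fp e.1) then "0.4" else d := by
  induction l with
  | nil => simp [pvLoopA]
  | cons e rest ih =>
      obtain ⟨ending, pri⟩ := e
      have hpri : pri = "0.4" := h (ending, pri) (by simp)
      simp only [pvLoopA, List.any_cons, PySem.Str.endswith_eq]
      by_cases he : PySem.Chars.endswith fp.toList ending.toList = true
      · simp [he, hpri]
      · simp only [Bool.not_eq_true] at he
        have hih := ih (fun e hm => h e (List.mem_cons_of_mem _ hm))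
        simp only [PySem.Str.endswith_eq] at hih
        rw [hih]
        simp only [he, Bool.false_or]
        simp

-- the last 7 characters: '_'::c::".html" is a suffix of l iff ".html" is, l has ≥ 7 chars,
-- and the characters at positions len-7, len-6 are '_' and c
theorem pvSuffix7 (l : List Char) (c : Char) :
    ('_' :: c :: ['.', 'h', 't', 'm', 'l']) <:+ l ↔
      (['.', 'h', 't', 'm', 'l'] <:+ l ∧ 7 ≤ l.length ∧
        l[l.length - 7]? = some '_' ∧ l[l.length - 6]? = some c) := by
  constructor
  · intro h
    have hlen : 7 ≤ l.length := by
      have := h.length_le; simpa using this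
    have h7 : l.length - 7 < l.length := by omega
    have h6 : l.length - 6 < l.length := by omega
    have e1 : l.drop (l.length - 7) = l[l.length - 7] :: l.drop (l.length - 6) := by
      have h' : l.length - 6 = (l.length - 7) + 1 := by omega
      rw [List.drop_eq_getElem_cons h7, h']
    have e2 : l.drop (l.length - 6) = l[l.length - 6] :: l.drop (l.length - 5) := by
      have h' : l.length - 5 = (l.length - 6) + 1 := by omega
      rw [List.drop_eq_getElem_cons h6, h']
    have hdrop : l.drop (l.length - 7) = '_' :: c :: ['.', 'h', 't', 'm', 'l'] := by
      have := (List.suffix_iff_eq_drop.mp h)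
      simpa using this.symm
    rw [e1, e2] at hdrop
    have h1 : l[l.length - 7] = '_' := by injection hdrop with a b
    have rest : l[l.length - 6] :: l.drop (l.length - 5) = c :: ['.', 'h', 't', 'm', 'l'] := by
      injection hdrop with a b
    have h2 : l[l.length - 6] = c := by injection rest with a b
    have h3 : l.drop (l.length - 5) = ['.', 'h', 't', 'm', 'l'] := by
      injection rest with a b
    refine ⟨?_, hlen, ?_, ?_⟩
    · rw [← h3]; exact List.drop_suffix _ _
    · simp [List.getElem?_eq_getElem h7, h1]
    · simp [List.getElem?_eq_getElem h6, h2]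
  · rintro ⟨hsuf, hlen, hg7, hg6⟩
    have h7 : l.length - 7 < l.length := by omega
    have h6 : l.length - 6 < l.length := by omega
    have h1 : l[l.length - 7] = '_' := by
      rw [List.getElem?_eq_getElem h7] at hg7; injection hg7
    have h2 : l[l.length - 6] = c := by
      rw [List.getElem?_eq_getElem h6] at hg6; injection hg6
    have h3 : l.drop (l.length - 5) = ['.', 'h', 't', 'm', 'l'] := by
      have := List.suffix_iff_eq_drop.mp hsuf
      simpa using this.symm
    have e1 : l.drop (l.length - 7) = l[l.length - 7] :: l.drop (l.length - 6) := by
      have h' : l.length - 6 = (l.length - 7) + 1 := by omega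
      rw [List.drop_eq_getElem_cons h7, h']
    have e2 : l.drop (l.length - 6) = l[l.length - 6] :: l.drop (l.length - 5) := by
      have h' : l.length - 5 = (l.length - 6) + 1 := by omega
      rw [List.drop_eq_getElem_cons h6, h']
    have hd : l.drop (l.length - 7) = '_' :: c :: ['.', 'h', 't', 'm', 'l'] := by
      rw [e1, e2, h1, h2, h3]
    rw [← hd]; exact List.drop_suffix _ _

-- the generated-family scan equals B's direct last-seven-characters test
theorem pvTail_eq (fp d : String) :
    pvLoopA pvTail35 fp d =
      (if (7 ≤ PySem.Str.len fp) && PySem.Str.endswith fp ".html"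
          && (PySem.Str.pyGet? fp (-7) == some '_')
          && (match PySem.Str.pyGet? fp (-6) with
              | some c => "123456789abcdefghijklmnopqrstuvwxyz".toList.contains c
              | none => false) then "0.4" else d) := by
  have hcond : (pvTail35.any (fun e => PySem.Str.endswith fp e.1))
      = ((7 ≤ PySem.Str.len fp) && PySem.Str.endswith fp ".html"
        && (PySem.Str.pyGet? fp (-7) == some '_')
        && (match PySem.Str.pyGet? fp (-6) with
            | some c => "123456789abcdefghijklmnopqrstuvwxyz".toList.contains c
            | none => false)) := by
    rw [Bool.eq_iff_iff]
    simp only [List.any_eq_true, pvTail35, List.mem_map, pvClassChars]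
    constructor
    · rintro ⟨e, ⟨c, hc, rfl⟩, hend⟩
      have hend2 : PySem.Str.endswith fp ("_" ++ String.ofList [c] ++ ".html") = true := hend
      rw [PySem.Str.endswith_eq, PySem.Chars.endswith_iff] at hend2
      have hl : ("_" ++ String.ofList [c] ++ ".html").toList = '_' :: c :: ['.', 'h', 't', 'm', 'l'] := by
        simp
      rw [hl] at hend2
      rw [pvSuffix7] at hend2
      obtain ⟨hs, hlen, hg7, hg6⟩ := hend2
      simp only [Bool.and_eq_true, decide_eq_true_eq, PySem.Str.endswith_eq,
        PySem.Str.pyGet?_eq, PySem.Chars.pyGet?_eq_listPyGet?, PySem.Str.len_eq, beq_iff_eq]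
      refine ⟨⟨⟨?_, ?_⟩, ?_⟩, ?_⟩
      · simpa using hlen
      · rw [PySem.Chars.endswith_iff]; simpa using hs
      · rw [PySem.List.pyGet?_neg_ofNat _ 7 (by omega) (by omega)]; exact hg7
      · rw [PySem.List.pyGet?_neg_ofNat _ 6 (by omega) (by omega), hg6]
        simpa using hc
    · intro h
      simp only [Bool.and_eq_true, decide_eq_true_eq, PySem.Str.endswith_eq,
        PySem.Str.pyGet?_eq, PySem.Chars.pyGet?_eq_listPyGet?, PySem.Str.len_eq, beq_iff_eq] at h
      obtain ⟨⟨⟨hlen, hs⟩, hg7⟩, hcls⟩ := h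
      rw [PySem.List.pyGet?_neg_ofNat _ 7 (by omega) (by omega)] at hg7
      rw [PySem.List.pyGet?_neg_ofNat _ 6 (by omega) (by omega)] at hcls
      rw [PySem.Chars.endswith_iff] at hs
      have h6 : fp.toList.length - 6 < fp.toList.length := by omega
      rw [List.getElem?_eq_getElem h6] at hcls
      set c := fp.toList[fp.toList.length - 6] with hcdef
      have hmem : c ∈ "123456789abcdefghijklmnopqrstuvwxyz".toList := by
        simpa using hcls
      refine ⟨_, ⟨c, hmem, rfl⟩, ?_⟩
      show PySem.Str.endswith fp ("_" ++ String.ofList [c] ++ ".html") = true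
      rw [PySem.Str.endswith_eq, PySem.Chars.endswith_iff]
      have hl : ("_" ++ String.ofList [c] ++ ".html").toList = '_' :: c :: ['.', 'h', 't', 'm', 'l'] := by
        simp
      rw [hl, pvSuffix7]
      refine ⟨by simpa using hs, by omega, hg7, by rw [List.getElem?_eq_getElem h6]⟩
  rw [pvLoopA_const]
  · simp only [hcond]
  · intro e he
    simp only [pvTail35, List.mem_map] at he
    obtain ⟨c, _, rfl⟩ := he
    rfl

-- ===== VERDICT (by name: the statement is the Claim_ definition above) =====
set_option maxHeartbeats 2000000 in
theorem get_url_priority_spec : Claim_equal_get_url_priority := by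
  intro fp d _
  unfold Spec_get_url_priority get_url_priority get_url_priority_alt
  rw [pvPriMap_items]
  simp only [List.cons_append, List.nil_append, pvLoopA]
  rw [pvTail_eq]
  simp only [PySem.Str.endswith_eq]
  rcases Bool.eq_false_or_eq_true (PySem.Chars.endswith fp.toList "development.html".toList) with t1 | t1 <;>
  rcases Bool.eq_false_or_eq_true (PySem.Chars.endswith fp.toList "downloads.html".toList) with t2 | t2 <;>
  rcases Bool.eq_false_or_eq_true (PySem.Chars.endswith fp.toList "index.html".toList) with t3 | t3 <;>
  rcases Bool.eq_false_or_eq_true (PySem.Chars.endswith fp.toList "source.html".toList) with t4 | t4 <;>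
  rcases Bool.eq_false_or_eq_true (PySem.Chars.endswith fp.toList "example.html".toList) with t5 | t5 <;>
  rcases Bool.eq_false_or_eq_true (PySem.Chars.endswith fp.toList "annotated.html".toList) with t6 | t6 <;>
  simp only [t1, t2, t3, t4, t5, t6] <;> simp
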